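-- pv_equiv track=rewrite | github.com/nguyentran6698/LC_Practice | codesignal/day4/1.py | solution
-- ===== SOURCE A (Python) =====
-- def solution(a):
--     res = []
--     if len(a) == 1:
--         return a
--     for i in range(len(a)):
--         if i == 0 :
--             res.append(0 + a[i] + a[i+1])
--         elif i == len(a) - 1:
--             res.append(a[i-1] + a[i] + 0)
--         else:
--             res.append(a[i-1] + a[i] + a[i+1])
--     return res
-- ===== SOURCE B (Python) =====
-- def solution(a):
--     n = len(a)
--     pref = [0]
--     for x in a:
--         pref.append(pref[-1] + x)
--     return [pref[min(i + 2, n)] - pref[max(i - 1, 0)] for i in range(n)]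
-- ===== Notes on version B (the rewrite author's own statement) =====
-- stated objective: alternative
-- what changed: Replaces the per-index three-term window sums with a prefix-sum array built in a first pass, each output becoming a difference of two prefix sums in a second pass (no per-position branching).
import Mathlib
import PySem

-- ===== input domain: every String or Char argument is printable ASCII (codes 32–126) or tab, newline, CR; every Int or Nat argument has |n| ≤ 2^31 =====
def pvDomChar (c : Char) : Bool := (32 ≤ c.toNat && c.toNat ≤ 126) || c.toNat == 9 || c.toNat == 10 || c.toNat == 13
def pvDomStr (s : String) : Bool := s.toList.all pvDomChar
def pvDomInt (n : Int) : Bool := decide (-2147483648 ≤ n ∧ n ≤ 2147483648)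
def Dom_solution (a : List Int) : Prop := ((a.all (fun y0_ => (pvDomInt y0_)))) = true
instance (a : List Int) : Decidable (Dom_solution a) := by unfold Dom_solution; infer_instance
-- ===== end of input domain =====

-- B replaces A's branching three-term window sums by a prefix-sum array built first,
-- each output then being a difference of two prefix sums (objective: alternative).

-- ===== PORT A =====
def solution (a : List Int) : List Int :=
  if a.length = 1 then a
  else
    (PySem.List.pyRange 0 a.length 1).foldl (fun res i =>
      if i = 0 then
        res ++ [0 + PySem.List.pyGetD a i 0 + PySem.List.pyGetD a (i + 1) 0]
      else if i = (a.length : Int) - 1 then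
        res ++ [PySem.List.pyGetD a (i - 1) 0 + PySem.List.pyGetD a i 0 + 0]
      else
        res ++ [PySem.List.pyGetD a (i - 1) 0 + PySem.List.pyGetD a i 0 + PySem.List.pyGetD a (i + 1) 0]) []

-- ===== PORT B =====
def solution_alt (a : List Int) : List Int :=
  let n : Int := a.length
  let pref : List Int := a.foldl (fun p x => p ++ [PySem.List.pyGetD p (-1) 0 + x]) [0]
  (PySem.List.pyRange 0 n 1).map (fun i =>
    PySem.List.pyGetD pref (min (i + 2) n) 0 - PySem.List.pyGetD pref (max (i - 1) 0) 0)

-- ===== PRECONDITION & SPEC =====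
def Spec_solution (a : List Int) (out : List Int) : Prop := out = solution_alt a
instance (a : List Int) (out : List Int) : Decidable (Spec_solution a out) := by unfold Spec_solution; infer_instance

-- ===== CLAIM (what is proved, stated in full; the proofs are below) =====
def Claim_equal_solution : Prop := ∀ (a : List Int), Dom_solution a → Spec_solution a (solution a)

-- ===== LEMMAS AND PROOFS =====

theorem foldl_body_snoc {α β : Type} (F : List β → α → List β) (f : α → β)
    (h : ∀ res i, F res i = res ++ [f i]) :
    ∀ (l : List α) (acc : List β), l.foldl F acc = acc ++ l.map f := by
  intro l
  induction l with
  | nil => simp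
  | cons x xs ih => intro acc; simp [List.foldl, h, ih]

/-- Running prefix sums starting after accumulated value `s`. -/
def prefs (s : Int) : List Int → List Int
  | [] => []
  | x :: xs => (s + x) :: prefs (s + x) xs

theorem foldl_pref (a : List Int) :
    ∀ (acc : List Int),
      a.foldl (fun p x => p ++ [PySem.List.pyGetD p (-1) 0 + x]) acc
        = acc ++ prefs (PySem.List.pyGetD acc (-1) 0) a := by
  induction a with
  | nil => intro acc; simp [prefs]
  | cons x xs ih =>
    intro acc
    simp only [List.foldl, prefs]
    rw [ih]
    simp [PySem.List.pyGetD_neg_one_append_singleton]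

theorem prefs_getD (a : List Int) :
    ∀ (s : Int) (k : Nat), k < a.length →
      (prefs s a).getD k 0 = s + (a.take (k + 1)).sum := by
  induction a with
  | nil => intro s k hk; simp at hk
  | cons x xs ih =>
    intro s k hk
    cases k with
    | zero => simp [prefs]
    | succ m =>
      simp only [prefs, List.getD_cons_succ, List.take_succ_cons, List.sum_cons]
      rw [ih (s + x) m (by simpa using hk)]
      ring

theorem sum_take_succ (a : List Int) :
    ∀ (j : Nat), (a.take (j + 1)).sum = (a.take j).sum + a.getD j 0 := by
  induction a with
  | nil => intro j; simp [List.getD]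
  | cons x xs ih =>
    intro j
    cases j with
    | zero => simp [List.getD]
    | succ m => simp only [List.take_succ_cons, List.sum_cons, List.getD_cons_succ, ih m]; ring

theorem pref_getD (a : List Int) (j : Nat) (hj : j ≤ a.length) :
    ((0 : Int) :: prefs 0 a).getD j 0 = (a.take j).sum := by
  cases j with
  | zero => simp
  | succ m =>
    rw [List.getD_cons_succ, prefs_getD a 0 m (by omega)]
    simp

-- ===== VERDICT (by name: the statement is the Claim_ definition above) =====
theorem solution_spec : Claim_equal_solution := by
  unfold Claim_equal_solution Spec_solution
  intro a _
  unfold solution solution_alt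
  by_cases h1 : a.length = 1
  · obtain ⟨x, rfl⟩ := List.length_eq_one_iff.mp h1
    norm_num [PySem.List.pyRange, PySem.List.pyGetD, PySem.List.pyGet?, PySem.List.pyIdx?]
  · simp only [if_neg h1]
    rw [foldl_body_snoc _
      (fun i => if i = 0 then 0 + PySem.List.pyGetD a i 0 + PySem.List.pyGetD a (i + 1) 0
        else if i = (a.length : Int) - 1 then PySem.List.pyGetD a (i - 1) 0 + PySem.List.pyGetD a i 0 + 0
        else PySem.List.pyGetD a (i - 1) 0 + PySem.List.pyGetD a i 0 + PySem.List.pyGetD a (i + 1) 0)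
      (by intro res i; dsimp only; split_ifs <;> rfl)]
    simp only [List.nil_append]
    rw [foldl_pref a [0]]
    apply List.map_congr_left
    intro i hi
    rw [PySem.List.mem_pyRange_one] at hi
    obtain ⟨hi0, hin⟩ := hi
    obtain ⟨k, rfl⟩ : ∃ k : Nat, i = (k : Int) := ⟨i.toNat, (Int.toNat_of_nonneg hi0).symm⟩
    have hkn : k < a.length := by exact_mod_cast hin
    have hn2 : 2 ≤ a.length := by omega
    have hbase : PySem.List.pyGetD [(0 : Int)] (-1) 0 = 0 := rfl
    rw [hbase]
    have hmin : min ((k : Int) + 2) (a.length : Int) = ((min (k + 2) a.length : Nat) : Int) := by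
      push_cast; omega
    have hmax : max ((k : Int) - 1) 0 = ((k - 1 : Nat) : Int) := by omega
    rw [hmin, hmax]
    simp only [PySem.List.pyGetD_natCast]
    have hlist : ([(0 : Int)] ++ prefs 0 a) = (0 :: prefs 0 a) := rfl
    rw [hlist, pref_getD a _ (by omega), pref_getD a _ (by omega)]
    by_cases hk0 : k = 0
    · subst hk0
      rw [if_pos (show ((0 : Nat) : Int) = 0 by norm_num)]
      rw [show ((0 : Nat) : Int) + 1 = ((1 : Nat) : Int) by norm_num]
      simp only [PySem.List.pyGetD_natCast]
      rw [show min (0 + 2) a.length = 2 by omega, show (0 - 1 : Nat) = 0 by omega]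
      have e1 := sum_take_succ a 0
      have e2 := sum_take_succ a 1
      rw [show ((0:Nat)+1 : Nat) = 1 from rfl] at e1
      rw [show ((1:Nat)+1 : Nat) = 2 from rfl] at e2
      simp only [List.take_zero, List.sum_nil] at e1 ⊢
      omega
    · have hne : ((k : Int)) ≠ 0 := by exact_mod_cast hk0
      rw [if_neg hne]
      have hm1 : ((k : Int)) - 1 = ((k - 1 : Nat) : Int) := by omega
      have eA := sum_take_succ a (k - 1)
      have eB := sum_take_succ a k
      rw [show (k - 1 + 1 : Nat) = k by omega] at eA
      by_cases hlast : k = a.length - 1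
      · have hlastI : ((k : Int)) = (a.length : Int) - 1 := by omega
        rw [if_pos hlastI, hm1]
        simp only [PySem.List.pyGetD_natCast]
        rw [show min (k + 2) a.length = k + 1 by omega]
        rw [show (k + 1 : Nat) = k + 1 from rfl] at eB
        omega
      · have hlastI : ((k : Int)) ≠ (a.length : Int) - 1 := by omega
        rw [if_neg hlastI, hm1,
          show ((k : Int)) + 1 = ((k + 1 : Nat) : Int) by push_cast; ring]
        simp only [PySem.List.pyGetD_natCast]
        rw [show min (k + 2) a.length = k + 2 by omega]
        have eC := sum_take_succ a (k + 1)
        rw [show (k + 1 + 1 : Nat) = k + 2 by omega] at eC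
        omega
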